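-- pv_equiv track=rewrite | github.com/ares30841167/wsimnet | tools/filter/website_pages.py | match_white_list
-- ===== SOURCE A (Python) =====
-- def match_white_list(url: str) -> bool:
--     url_white_list = [
--         # Discuz
--         'uc_server',
--         'forum',
--         'misc',
--         'archiver',
--         'search',
--         'home',
--         'member',
--         # Drupal
--         'user',
--         'login',
--         'register',
--         'password',
--         'node',
--         # Joomla
--         'administrator',
--         'component',
--         'option',
--         # WordPress
--         'wp-admin',
--         'wp-login',
--         'lostpassword',
--         'register',
--         'action'
--     ]
--
--     return any(keyword in url for keyword in url_white_list)
-- ===== SOURCE B (Python) =====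
-- # Same whitelist data as the original (it is the function's specification), used by a
-- # different algorithm: one position-major scan instead of per-keyword substring searches.
-- URL_WHITE_LIST = (
--     'uc_server', 'forum', 'misc', 'archiver', 'search', 'home', 'member',
--     'user', 'login', 'register', 'password', 'node',
--     'administrator', 'component', 'option',
--     'wp-admin', 'wp-login', 'lostpassword', 'register', 'action',
-- )
--
--
-- def match_white_list(url: str) -> bool:
--     # Single left-to-right scan over positions of url: at each position test
--     # whether some whitelisted keyword starts there (str.startswith with a tuple
--     # checks all keywords at that position), returning at the first hit.
--     for i in range(len(url) + 1):
--         if url.startswith(URL_WHITE_LIST, i):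
--             return True
--     return False
-- ===== Notes on version B (the rewrite author's own statement) =====
-- stated objective: alternative
-- what changed: B replaces A's keyword-major loop (a full substring search of url per keyword) with a single position-major left-to-right scan of url that tests at each position whether any keyword starts there, returning at the first hit.
import Mathlib
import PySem

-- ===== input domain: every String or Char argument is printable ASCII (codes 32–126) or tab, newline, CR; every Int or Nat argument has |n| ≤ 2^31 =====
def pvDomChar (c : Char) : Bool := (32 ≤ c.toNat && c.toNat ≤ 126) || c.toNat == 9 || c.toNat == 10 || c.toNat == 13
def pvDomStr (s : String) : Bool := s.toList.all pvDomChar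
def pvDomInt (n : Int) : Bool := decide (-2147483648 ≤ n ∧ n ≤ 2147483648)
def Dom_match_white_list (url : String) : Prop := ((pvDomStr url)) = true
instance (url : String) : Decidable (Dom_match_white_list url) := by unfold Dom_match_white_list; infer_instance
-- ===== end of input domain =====

-- B replaces A's keyword-major substring searches with a single position-major scan of the url
-- (at each position, test whether some keyword starts there); alternative decomposition, same result.


-- ===== PORT A =====
-- the literal whitelist of A
def urlWhiteListA : List String :=
  ["uc_server", "forum", "misc", "archiver", "search", "home", "member",
   "user", "login", "register", "password", "node",
   "administrator", "component", "option",
   "wp-admin", "wp-login", "lostpassword", "register", "action"]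

-- any(keyword in url for keyword in url_white_list)
def match_white_list (url : String) : Bool :=
  urlWhiteListA.any (fun keyword => PySem.Str.isIn keyword url)

-- ===== PORT B =====
-- the literal whitelist of B (identical contents)
def urlWhiteListB : List String :=
  ["uc_server", "forum", "misc", "archiver", "search", "home", "member",
   "user", "login", "register", "password", "node",
   "administrator", "component", "option",
   "wp-admin", "wp-login", "lostpassword", "register", "action"]

-- the position loop 'for i in range(len(url)+1): …' as structural recursion over
-- the successive suffixes of url (position i ↔ suffix url[i:]); Python's tuple form
-- url.startswith(URL_WHITE_LIST, i) means 'some keyword starts at i', i.e.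
-- kws.any (Chars.startswith <suffix> ·) on that suffix (exact for 0 ≤ i ≤ len(url)).
def scanPositions (kws : List (List Char)) : List Char → Bool
  | [] => kws.any (fun k => PySem.Chars.startswith [] k)
  | c :: rest =>
      if kws.any (fun k => PySem.Chars.startswith (c :: rest) k) then true
      else scanPositions kws rest

def match_white_list_alt (url : String) : Bool :=
  scanPositions (urlWhiteListB.map String.toList) url.toList

-- ===== PRECONDITION & SPEC =====
def Spec_match_white_list (url : String) (out : Bool) : Prop := out = match_white_list_alt url
instance (url : String) (out : Bool) : Decidable (Spec_match_white_list url out) := by unfold Spec_match_white_list; infer_instance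

-- ===== CLAIM (what is proved, stated in full; the proofs are below) =====
def Claim_equal_match_white_list : Prop := ∀ (url : String), Dom_match_white_list url → Spec_match_white_list url (match_white_list url)

-- ===== LEMMAS AND PROOFS =====

-- the position-major scan decides 'some keyword is an infix' for any keyword list
theorem scanPositions_eq_any_isIn (kws : List (List Char)) (s : List Char) :
    scanPositions kws s = kws.any (fun k => PySem.Chars.isIn k s) := by
  induction s with
  | nil =>
      rw [scanPositions, Bool.eq_iff_iff]
      simp only [List.any_eq_true, PySem.Chars.startswith_iff, PySem.Chars.isIn_iff_infix,
        List.prefix_nil, List.infix_nil]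
  | cons c rest ih =>
      rw [scanPositions]
      cases hA : kws.any (fun k => PySem.Chars.startswith (c :: rest) k) with
      | true =>
          rw [if_pos rfl]
          rw [List.any_eq_true] at hA
          obtain ⟨k, hk, hsw⟩ := hA
          rw [eq_comm, List.any_eq_true]
          exact ⟨k, hk, by
            rw [PySem.Chars.isIn_iff_infix]
            exact ((PySem.Chars.startswith_iff _ _).mp hsw).isInfix⟩
      | false =>
          rw [if_neg (by simp), ih, Bool.eq_iff_iff]
          rw [List.any_eq_false] at hA
          simp only [List.any_eq_true, PySem.Chars.isIn_iff_infix]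
          constructor
          · rintro ⟨k, hk, hinf⟩
            exact ⟨k, hk, hinf.trans (List.suffix_cons c rest).isInfix⟩
          · rintro ⟨k, hk, hinf⟩
            rcases List.infix_cons_iff.mp hinf with hpre | hinf'
            · exact absurd ((PySem.Chars.startswith_iff _ _).mpr hpre) (by simpa using hA k hk)
            · exact ⟨k, hk, hinf'⟩

-- ===== VERDICT (by name: the statement is the Claim_ definition above) =====
theorem match_white_list_spec : Claim_equal_match_white_list := by
  intro url _
  unfold Spec_match_white_list match_white_list match_white_list_alt
  rw [scanPositions_eq_any_isIn, List.any_map]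
  simp [urlWhiteListA, urlWhiteListB, Function.comp, PySem.Str.isIn]
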